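-- pv_equiv track=rewrite | github.com/kelvin0520lcy/ihg_scheduler_bot | handlers/admin.py | _calendar_text
-- ===== SOURCE A (Python) =====
-- def _calendar_text(fixtures: list, days: int) -> str:
--     by_date = {}
--     for f in fixtures:
--         d, t = f["match_dt"].split(" ")
--         by_date.setdefault(d, []).append((t, f))
--     lines = [f"🗓 *Overall Schedule Calendar — next {days} day(s)*"]
--     for d in sorted(by_date.keys()):
--         lines.append(f"\n*{d}*")
--         for t, f in sorted(by_date[d], key=lambda x: x[0]):
--             lines.append(f"`{t}`  {f['sport']}  ({f['hall_a']} vs {f['hall_b']})")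
--     return "\n".join(lines)
-- ===== SOURCE B (Python) =====
-- def _calendar_text(fixtures: list, days: int) -> str:
--     rows = []
--     for f in fixtures:
--         d, t = f["match_dt"].split(" ")
--         rows.append((d, t, f))
--     rows.sort(key=lambda r: (r[0], r[1]))
--     lines = [f"🗓 *Overall Schedule Calendar — next {days} day(s)*"]
--     prev = None
--     for d, t, f in rows:
--         if prev != d:
--             lines.append(f"\n*{d}*")
--             prev = d
--         lines.append(f"`{t}`  {f['sport']}  ({f['hall_a']} vs {f['hall_b']})")
--     return "\n".join(lines)
-- ===== Notes on version B (the rewrite author's own statement) =====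
-- stated objective: alternative
-- what changed: A groups fixtures into a per-date dict of lists and sorts each date's bucket separately after sorting the keys; B builds one flat list of (date, time, fixture) rows, stable-sorts it once by the (date, time) pair and emits date headers in a single pass with a prev-date variable.
import Mathlib
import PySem

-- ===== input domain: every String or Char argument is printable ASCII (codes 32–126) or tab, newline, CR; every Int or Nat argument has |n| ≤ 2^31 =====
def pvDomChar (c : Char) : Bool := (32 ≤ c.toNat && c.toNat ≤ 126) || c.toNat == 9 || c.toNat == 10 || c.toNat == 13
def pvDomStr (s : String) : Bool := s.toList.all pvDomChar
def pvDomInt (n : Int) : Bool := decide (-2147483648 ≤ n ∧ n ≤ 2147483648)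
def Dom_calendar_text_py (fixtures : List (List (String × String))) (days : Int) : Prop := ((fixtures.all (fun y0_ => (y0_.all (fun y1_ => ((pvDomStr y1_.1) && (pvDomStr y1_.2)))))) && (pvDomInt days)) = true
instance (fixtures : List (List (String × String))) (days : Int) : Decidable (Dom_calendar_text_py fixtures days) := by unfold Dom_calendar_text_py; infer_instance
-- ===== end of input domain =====

-- B replaces A's per-date dict of lists (grouped, then sorted per group) by ONE stable sort of all
-- (date, time, fixture) rows followed by a single pass that emits a date header whenever the date
-- changes (objective: simpler / alternative decomposition; return value only, no mutation involved).

-- shared formatting / field-access helpers (both Pythons contain the identical f-strings and subscripts)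
def pvField (f : List (String × String)) (k : String) : String := (PySem.Dict.mk f).getD k ""
def pvDate (f : List (String × String)) : String := (((PySem.Str.split? (pvField f "match_dt") " ").getD [])).getD 0 ""
def pvTime (f : List (String × String)) : String := (((PySem.Str.split? (pvField f "match_dt") " ").getD [])).getD 1 ""
def pvHeader (days : Int) : String := "🗓 *Overall Schedule Calendar — next " ++ PySem.Int.toStr days ++ " day(s)*"
def pvLine (t : String) (f : List (String × String)) : String :=
  "`" ++ t ++ "`  " ++ pvField f "sport" ++ "  (" ++ pvField f "hall_a" ++ " vs " ++ pvField f "hall_b" ++ ")"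

-- ===== PORT A =====
-- dict grouping (setdefault+append = modify with default []), sorted keys, per-key sort by time
def calendar_text_py (fixtures : List (List (String × String))) (days : Int) : String :=
  let by_date : PySem.Dict String (List (String × List (String × String))) :=
    fixtures.foldl (fun bd f => bd.modify (pvDate f) [] (· ++ [(pvTime f, f)])) PySem.Dict.empty
  let lines :=
    (PySem.List.sorted by_date.keys (fun x => x) false).foldl
      (fun lines d =>
        (PySem.List.sorted (by_date.getD d []) (fun x => x.1) false).foldl
          (fun lines tf => lines ++ [pvLine tf.1 tf.2])
          (lines ++ ["\n*" ++ d ++ "*"]))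
      [pvHeader days]
  PySem.Str.join "\n" lines

-- ===== PORT B =====
-- loop body of B's single pass: emit a "\n*date*" header when the date differs from prev, then the line
def pvStepB (st : List String × Option String) (r : String × String × List (String × String)) :
    List String × Option String :=
  let st := if st.2 == some r.1 then st else (st.1 ++ ["\n*" ++ r.1 ++ "*"], some r.1)
  (st.1 ++ [pvLine r.2.1 r.2.2], st.2)

def calendar_text_py_alt (fixtures : List (List (String × String))) (days : Int) : String :=
  let rows : List (String × String × List (String × String)) :=
    fixtures.foldl (fun rows f => rows ++ [(pvDate f, pvTime f, f)]) []
  let srows := PySem.List.sorted2 rows (fun r => r.1) (fun r => r.2.1) false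
  let st := srows.foldl pvStepB ([pvHeader days], none)
  PySem.Str.join "\n" st.1

-- ===== PRECONDITION & SPEC =====
-- Pre_: every fixture has the four keys A subscripts and its "match_dt" splits on " " into exactly two
-- parts (elsewhere the Python raises KeyError / a unpack ValueError).
def Pre_calendar_text_py (fixtures : List (List (String × String))) (days : Int) : Prop :=
  ∀ f ∈ fixtures,
    (PySem.Dict.mk f).contains "match_dt" = true ∧
    ((PySem.Str.split? ((PySem.Dict.mk f).getD "match_dt" "") " ").getD []).length = 2 ∧
    (PySem.Dict.mk f).contains "sport" = true ∧
    (PySem.Dict.mk f).contains "hall_a" = true ∧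
    (PySem.Dict.mk f).contains "hall_b" = true
instance (fixtures : List (List (String × String))) (days : Int) : Decidable (Pre_calendar_text_py fixtures days) := by
  unfold Pre_calendar_text_py; infer_instance

def pvWitness_calendar_text_py : (List (List (String × String))) × Int :=
  ([[("match_dt", "2024-01-02 10:00"), ("sport", "chess"), ("hall_a", "A"), ("hall_b", "B")]], 3)

def Spec_calendar_text_py (fixtures : List (List (String × String))) (days : Int) (out : String) : Prop := out = calendar_text_py_alt fixtures days
instance (fixtures : List (List (String × String))) (days : Int) (out : String) : Decidable (Spec_calendar_text_py fixtures days out) := by unfold Spec_calendar_text_py; infer_instance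

-- ===== CLAIM (what is proved, stated in full; the proofs are below) =====
def Claim_equal_calendar_text_py : Prop := ∀ (fixtures : List (List (String × String))) (days : Int), Dom_calendar_text_py fixtures days → Pre_calendar_text_py fixtures days → Spec_calendar_text_py fixtures days (calendar_text_py fixtures days)

-- ===== LEMMAS AND PROOFS =====

-- basic equations for PySem.List.insertBy
theorem pvInsertBy_nil {α : Type} (b : α → α → Bool) (x : α) : PySem.List.insertBy b x [] = [x] := rfl

theorem pvInsertBy_cons {α : Type} (b : α → α → Bool) (x y : α) (ys : List α) :
    PySem.List.insertBy b x (y :: ys) =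
      if b x y then x :: y :: ys else y :: PySem.List.insertBy b x ys := rfl

-- x "not before" every element of g: insertion skips over g
theorem pvInsertBy_skip {α : Type} (b : α → α → Bool) (x : α) (g rest : List α)
    (h : ∀ y ∈ g, b x y = false) :
    PySem.List.insertBy b x (g ++ rest) = g ++ PySem.List.insertBy b x rest := by
  induction g with
  | nil => simp
  | cons y g ih =>
      simp only [List.cons_append, pvInsertBy_cons, h y (by simp)]
      simp [ih (fun z hz => h z (by simp [hz]))]

-- on g the two orders agree and x goes before everything in rest: insertion stays inside g
theorem pvInsertBy_local {α : Type} (bf bl : α → α → Bool) (x : α) (g rest : List α)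
    (hg : ∀ y ∈ g, bf x y = bl x y) (hrest : ∀ h ∈ rest, bf x h = true) :
    PySem.List.insertBy bf x (g ++ rest) = PySem.List.insertBy bl x g ++ rest := by
  induction g with
  | nil =>
      cases rest with
      | nil => simp [pvInsertBy_nil]
      | cons h t => simp [pvInsertBy_nil, pvInsertBy_cons, hrest h (by simp)]
  | cons y g ih =>
      have hy := hg y (by simp)
      by_cases hb : bl x y
      · simp [pvInsertBy_cons, hy, hb]
      · simp only [List.cons_append, pvInsertBy_cons, hy, hb]
        simp [ih (fun z hz => hg z (by simp [hz]))]

theorem pvInsertBy_map {α β : Type} (b : β → β → Bool) (g : α → β) (x : α) (ys : List α) :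
    (PySem.List.insertBy (fun a c => b (g a) (g c)) x ys).map g =
      PySem.List.insertBy b (g x) (ys.map g) := by
  induction ys with
  | nil => simp [pvInsertBy_nil]
  | cons y ys ih =>
      by_cases hb : b (g x) (g y)
      · simp [pvInsertBy_cons, hb]
      · simp [pvInsertBy_cons, hb, ih]

-- sorting a mapped list = mapping the sort under the composed key
theorem pvSortedFoldlMap {α β κ : Type} [LinearOrder κ] (key : β → κ) (g : α → β)
    (l : List α) (acc : List α) :
    (l.foldl (fun acc x => PySem.List.insertBy (fun a c => decide (key (g a) < key (g c))) x acc) acc).map g =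
      l.foldl (fun acc x => PySem.List.insertBy (fun a c => decide (key a < key c)) (g x) acc) (acc.map g) := by
  induction l generalizing acc with
  | nil => rfl
  | cons x l ih =>
      simp only [List.foldl_cons]
      rw [ih, pvInsertBy_map (fun a c => decide (key a < key c)) g x acc]

theorem pvSorted_map {α β κ : Type} [LinearOrder κ] (key : β → κ) (g : α → β) (l : List α) :
    PySem.List.sorted (l.map g) key false =
      (PySem.List.sorted l (fun x => key (g x)) false).map g := by
  rw [PySem.List.sorted_eq_foldl_insertBy, PySem.List.sorted_eq_foldl_insertBy, List.foldl_map]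
  rw [pvSortedFoldlMap key g l []]
  rfl

-- snoc equations for the two sorts
theorem pvSorted_snoc {α κ : Type} [LinearOrder κ] (key : α → κ) (xs : List α) (x : α) :
    PySem.List.sorted (xs ++ [x]) key false =
      PySem.List.insertBy (fun a b => decide (key a < key b)) x (PySem.List.sorted xs key false) := by
  rw [PySem.List.sorted_eq_foldl_insertBy, PySem.List.sorted_eq_foldl_insertBy, List.foldl_append]
  rfl

def pvB2 {α κ₁ κ₂ : Type} [LinearOrder κ₁] [LinearOrder κ₂] (k1 : α → κ₁) (k2 : α → κ₂) :
    α → α → Bool :=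
  fun a b => decide (k1 a < k1 b) || (!decide (k1 b < k1 a) && decide (k2 a < k2 b))

theorem pvSorted2_eq_foldl {α κ₁ κ₂ : Type} [LinearOrder κ₁] [LinearOrder κ₂]
    (xs : List α) (k1 : α → κ₁) (k2 : α → κ₂) :
    PySem.List.sorted2 xs k1 k2 false =
      xs.foldl (fun acc x => PySem.List.insertBy (pvB2 k1 k2) x acc) [] := rfl

theorem pvSorted2_snoc {α κ₁ κ₂ : Type} [LinearOrder κ₁] [LinearOrder κ₂]
    (xs : List α) (x : α) (k1 : α → κ₁) (k2 : α → κ₂) :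
    PySem.List.sorted2 (xs ++ [x]) k1 k2 false =
      PySem.List.insertBy (pvB2 k1 k2) x (PySem.List.sorted2 xs k1 k2 false) := by
  rw [pvSorted2_eq_foldl, pvSorted2_eq_foldl, List.foldl_append]
  rfl

-- inserting one element into a date-blocked concatenation
theorem pvIns {α κ₁ κ₂ : Type} [LinearOrder κ₁] [LinearOrder κ₂] (k1 : α → κ₁) (k2 : α → κ₂)
    (x : α) (ds : List κ₁) (G : κ₁ → List α)
    (hsort : ds.Pairwise (· < ·))
    (hG : ∀ dd ∈ ds, G dd ≠ [] ∧ ∀ r ∈ G dd, k1 r = dd) :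
    PySem.List.insertBy (pvB2 k1 k2) x (ds.flatMap G) =
      if k1 x ∈ ds then
        ds.flatMap (fun dd => if dd = k1 x then
          PySem.List.insertBy (fun a b => decide (k2 a < k2 b)) x (G dd) else G dd)
      else
        (PySem.List.insertBy (fun a b => decide (a < b)) (k1 x) ds).flatMap
          (fun dd => if dd = k1 x then [x] else G dd) := by
  induction ds with
  | nil => simp [pvInsertBy_nil]
  | cons d ds ih =>
      have hgd := hG d (by simp)
      have hlt : ∀ e ∈ ds, d < e := fun e he => (List.pairwise_cons.mp hsort).1 e he
      rcases lt_trichotomy (k1 x) d with hxd | hxd | hxd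
      · -- k1 x < d : x goes to the very front; its date is new
        have hnm : k1 x ∉ d :: ds := by
          intro hmem
          rcases List.mem_cons.mp hmem with h | h
          · subst h; exact lt_irrefl _ hxd
          · exact absurd (lt_trans hxd (hlt _ h)) (lt_irrefl _)
        rw [if_neg hnm]
        obtain ⟨c, cs, hc⟩ : ∃ c cs, G d = c :: cs := by
          cases hGd : G d with
          | nil => exact absurd hGd hgd.1
          | cons c cs => exact ⟨c, cs, rfl⟩
        have hcd : k1 c = d := hgd.2 c (by rw [hc]; simp)
        have hbefore : pvB2 k1 k2 x c = true := by
          simp [pvB2, hcd, hxd]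
        rw [List.flatMap_cons, hc, List.cons_append, pvInsertBy_cons, hbefore]
        rw [pvInsertBy_cons]
        simp only [decide_eq_true_eq, hxd, if_pos]
        rw [List.flatMap_cons, if_pos rfl, List.flatMap_cons,
          if_neg (by intro h; subst h; exact lt_irrefl _ hxd)]
        have : (ds.flatMap fun dd => if dd = k1 x then [x] else G dd) = ds.flatMap G := by
          apply List.flatMap_congr
          intro dd hdd
          exact if_neg (by intro h; exact absurd (lt_trans hxd (hlt _ hdd)) (by rw [h]; exact lt_irrefl _))
        rw [this, hc]
        simp
      · -- k1 x = d : x stays inside d's block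
        rw [if_pos (by simp [hxd])]
        rw [List.flatMap_cons]
        rw [pvInsertBy_local (pvB2 k1 k2) (fun a b => decide (k2 a < k2 b)) x (G d) (ds.flatMap G)
          (by
            intro y hy
            have := hgd.2 y hy
            simp [pvB2, this, hxd])
          (by
            intro h hh
            rcases List.mem_flatMap.mp hh with ⟨dd, hdd, hhd⟩
            have h1 : k1 h = dd := (hG dd (by simp [hdd])).2 h hhd
            have : k1 x < k1 h := by rw [h1, hxd]; exact hlt dd hdd
            simp [pvB2, this])]
        rw [List.flatMap_cons, if_pos hxd.symm]
        have : (ds.flatMap fun dd => if dd = k1 x then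
            PySem.List.insertBy (fun a b => decide (k2 a < k2 b)) x (G dd) else G dd) = ds.flatMap G := by
          apply List.flatMap_congr
          intro dd hdd
          exact if_neg (by intro h; exact absurd (hlt dd hdd) (by rw [← hxd, h]; exact lt_irrefl _))
        rw [this]
      · -- d < k1 x : skip d's whole block and recurse
        have hskip : ∀ y ∈ G d, pvB2 k1 k2 x y = false := by
          intro y hy
          have := hgd.2 y hy
          simp only [pvB2, this, Bool.or_eq_false_iff, Bool.and_eq_false_iff, decide_eq_false_iff_not]
          constructor
          · exact not_lt_of_gt hxd
          · left
            simp [hxd]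
        rw [List.flatMap_cons, pvInsertBy_skip _ _ _ _ hskip,
          ih ((List.pairwise_cons.mp hsort).2)
            (fun dd hdd => hG dd (by simp [hdd]))]
        by_cases hmem : k1 x ∈ ds
        · rw [if_pos hmem, if_pos (by simp [hmem])]
          rw [List.flatMap_cons, if_neg (by intro h; subst h; exact lt_irrefl _ hxd)]
        · rw [if_neg hmem, if_neg (by
            intro h
            rcases List.mem_cons.mp h with h | h
            · subst h; exact lt_irrefl _ hxd
            · exact hmem h)]
          rw [pvInsertBy_cons, if_neg (by simp [not_lt_of_gt hxd])]
          rw [List.flatMap_cons, if_neg (by intro h; subst h; exact lt_irrefl _ hxd)]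

-- MAIN: one stable two-key sort = sorted distinct first keys, each block stably sorted by the second key
theorem pvOfList_snoc {α : Type} [BEq α] (l : List α) (a : α) :
    PySem.Set.ofList (l ++ [a]) = PySem.Set.add (PySem.Set.ofList l) a := by
  simp [PySem.Set.ofList, List.foldl_append]

theorem pvAdd_mem {α : Type} [BEq α] [LawfulBEq α] (s : PySem.Set α) (a : α) (h : a ∈ s) :
    PySem.Set.add s a = s := by
  simp [PySem.Set.add, h]

theorem pvAdd_not_mem {α : Type} [BEq α] [LawfulBEq α] (s : PySem.Set α) (a : α) (h : a ∉ s) :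
    PySem.Set.add s a = s ++ [a] := by
  simp [PySem.Set.add, h]

theorem pvMain {α κ₁ κ₂ : Type} [LinearOrder κ₁] [LinearOrder κ₂] [BEq κ₁] [LawfulBEq κ₁]
    (k1 : α → κ₁) (k2 : α → κ₂) (rows : List α) :
    PySem.List.sorted2 rows k1 k2 false =
      (PySem.List.sorted (PySem.Set.ofList (rows.map k1)) (fun x => x) false).flatMap
        (fun dd => PySem.List.sorted (rows.filter (fun r => k1 r == dd)) k2 false) := by
  induction rows using List.reverseRecOn with
  | nil => rfl
  | append_singleton rs x ih =>
      rw [pvSorted2_snoc, ih]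
      have hsort : (PySem.List.sorted (PySem.Set.ofList (rs.map k1)) (fun x => x) false).Pairwise (· < ·) :=
        PySem.List.sorted_ofList_pairwise_lt (rs.map k1)
      have hGprop : ∀ dd ∈ PySem.List.sorted (PySem.Set.ofList (rs.map k1)) (fun x => x) false,
          PySem.List.sorted (rs.filter (fun r => k1 r == dd)) k2 false ≠ [] ∧
          ∀ r ∈ PySem.List.sorted (rs.filter (fun r => k1 r == dd)) k2 false, k1 r = dd := by
        intro dd hdd
        have hdd' : dd ∈ rs.map k1 :=
          (PySem.Set.mem_ofList _ _).mp ((PySem.List.mem_sorted _ _ _ _).mp hdd)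
        constructor
        · rw [Ne, PySem.List.sorted_eq_nil_iff]
          obtain ⟨r, hr, hk⟩ := List.mem_map.mp hdd'
          intro hnil
          have : r ∈ rs.filter (fun r => k1 r == dd) := List.mem_filter.mpr ⟨hr, by simp [hk]⟩
          simp [hnil] at this
        · intro r hrmem
          have := (PySem.List.mem_sorted _ _ _ _).mp hrmem
          simpa using (List.mem_filter.mp this).2
      rw [pvIns k1 k2 x _ _ hsort hGprop]
      by_cases hm : k1 x ∈ rs.map k1
      · rw [if_pos (by rw [PySem.List.mem_sorted, PySem.Set.mem_ofList]; exact hm)]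
        have hset : PySem.Set.ofList ((rs ++ [x]).map k1) = PySem.Set.ofList (rs.map k1) := by
          rw [List.map_append, List.map_singleton, pvOfList_snoc,
            pvAdd_mem _ _ ((PySem.Set.mem_ofList _ _).mpr hm)]
        rw [hset]
        apply List.flatMap_congr
        intro dd hdd
        have hf : (rs ++ [x]).filter (fun r => k1 r == dd) =
            rs.filter (fun r => k1 r == dd) ++ (if k1 x = dd then [x] else []) := by
          rw [List.filter_append]
          congr 1
          by_cases hx : k1 x = dd <;> simp [hx]
        by_cases hx : dd = k1 x
        · rw [if_pos hx, hf, if_pos hx.symm, pvSorted_snoc]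
        · rw [if_neg hx, hf, if_neg (fun hc => hx hc.symm), List.append_nil]
      · rw [if_neg (by rw [PySem.List.mem_sorted, PySem.Set.mem_ofList]; exact hm)]
        have hset : PySem.Set.ofList ((rs ++ [x]).map k1) =
            PySem.Set.ofList (rs.map k1) ++ [k1 x] := by
          rw [List.map_append, List.map_singleton, pvOfList_snoc,
            pvAdd_not_mem _ _ (fun hc => hm ((PySem.Set.mem_ofList _ _).mp hc))]
        rw [hset, pvSorted_snoc (fun x => x) (PySem.Set.ofList (rs.map k1)) (k1 x)]
        apply List.flatMap_congr
        intro dd hdd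
        have hdd' := (PySem.List.mem_insertBy _ _ _ _).mp hdd
        by_cases hx : dd = k1 x
        · rw [if_pos hx]
          have hrsnil : rs.filter (fun r => k1 r == dd) = [] := by
            rw [List.filter_eq_nil_iff]
            intro r hr hc
            exact hm (List.mem_map.mpr ⟨r, hr, (eq_of_beq hc).trans hx⟩)
          rw [List.filter_append, hrsnil, List.nil_append]
          simp [hx]
          rfl
        · rw [if_neg hx]
          rw [List.filter_append]
          have : List.filter (fun r => k1 r == dd) [x] = [] := by
            have hb : (k1 x == dd) = false := beq_eq_false_iff_ne.mpr (fun hc => hx hc.symm)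
            simp [hb]
          rw [this, List.append_nil]
-- processing one date block in B's single pass (prev already = the block's date)
theorem pvGroupPass (g : List (String × String × List (String × String))) (dd : String)
    (hg : ∀ r ∈ g, r.1 = dd) (lines : List String) :
    g.foldl pvStepB (lines, some dd) =
      (lines ++ g.map (fun r => pvLine r.2.1 r.2.2), some dd) := by
  induction g generalizing lines with
  | nil => simp
  | cons r g ih =>
      have hr : r.1 = dd := hg r (by simp)
      simp only [List.foldl_cons, pvStepB, hr]
      simp only [beq_self_eq_true, if_pos]
      rw [ih (fun z hz => hg z (by simp [hz]))]
      simp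

-- B's single pass over a date-blocked concatenation emits exactly A's header/lines structure
theorem pvOnePass (ds : List String) (G : String → List (String × String × List (String × String)))
    (hnd : ds.Nodup)
    (hG : ∀ dd ∈ ds, (∀ r ∈ G dd, r.1 = dd) ∧ G dd ≠ [])
    (lines0 : List String) (prev0 : Option String) (hp : ∀ dd ∈ ds, prev0 ≠ some dd) :
    ((ds.flatMap G).foldl pvStepB (lines0, prev0)).1 =
      lines0 ++ ds.flatMap (fun dd => ("\n*" ++ dd ++ "*") :: (G dd).map (fun r => pvLine r.2.1 r.2.2)) := by
  induction ds generalizing lines0 prev0 with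
  | nil => simp
  | cons dd ds ih =>
      obtain ⟨hmem, hne⟩ := hG dd (by simp)
      obtain ⟨r0, g0, hr0⟩ : ∃ r0 g0, G dd = r0 :: g0 := by
        cases h : G dd with
        | nil => exact absurd h hne
        | cons a b => exact ⟨a, b, rfl⟩
      have hr01 : r0.1 = dd := hmem r0 (by rw [hr0]; simp)
      have hne' : prev0 ≠ some dd := hp dd (by simp)
      have hstep : pvStepB (lines0, prev0) r0 =
          (lines0 ++ ["\n*" ++ dd ++ "*"] ++ [pvLine r0.2.1 r0.2.2], some dd) := by
        simp [pvStepB, hr01, hne']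
      rw [List.flatMap_cons, hr0, List.cons_append, List.foldl_cons, hstep, List.foldl_append,
        pvGroupPass g0 dd (fun z hz => hmem z (by rw [hr0]; exact List.mem_cons_of_mem _ hz))]
      rw [ih (List.nodup_cons.mp hnd).2 (fun d' hd' => hG d' (by simp [hd'])) _ (some dd)
        (fun d' hd' hc => (List.nodup_cons.mp hnd).1 (by
          have : dd = d' := by injection hc
          rw [this]; exact hd'))]
      rw [List.flatMap_cons, hr0]
      simp
-- A's nested fold builds header :: lines blocks
theorem pvAFold (ds : List String) (G : String → List (String × List (String × String)))
    (lines0 : List String) :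
    ds.foldl
      (fun lines d => (G d).foldl (fun lines tf => lines ++ [pvLine tf.1 tf.2]) (lines ++ ["\n*" ++ d ++ "*"]))
      lines0 =
      lines0 ++ ds.flatMap (fun d => ("\n*" ++ d ++ "*") :: (G d).map (fun tf => pvLine tf.1 tf.2)) := by
  have h : ∀ (lines : List String) (d : String),
      (G d).foldl (fun lines tf => lines ++ [pvLine tf.1 tf.2]) (lines ++ ["\n*" ++ d ++ "*"]) =
        lines ++ (("\n*" ++ d ++ "*") :: (G d).map (fun tf => pvLine tf.1 tf.2)) := by
    intro lines d
    rw [PySem.List.foldl_append_singleton_eq_map]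
    simp
  calc ds.foldl _ lines0 = ds.foldl (fun lines d => lines ++ (("\n*" ++ d ++ "*") :: (G d).map (fun tf => pvLine tf.1 tf.2))) lines0 := by
        apply PySem.List.foldl_congr_mem
        intro acc d _
        exact h acc d
    _ = _ := PySem.List.foldl_append_eq_flatMap _ ds lines0

-- ===== VERDICT (by name: the statement is the Claim_ definition above) =====
theorem calendar_text_py_eq (fixtures : List (List (String × String))) (days : Int) :
    calendar_text_py fixtures days = calendar_text_py_alt fixtures days := by
  have hrows : fixtures.foldl (fun rows f => rows ++ [(pvDate f, pvTime f, f)])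
      ([] : List (String × String × List (String × String))) =
      fixtures.map (fun f => (pvDate f, pvTime f, f)) := by
    simpa using PySem.List.foldl_append_singleton_eq_map (fun f => (pvDate f, pvTime f, f)) fixtures []
  have hbd : fixtures.foldl (fun bd f => bd.modify (pvDate f) [] (· ++ [(pvTime f, f)]))
      (PySem.Dict.empty : PySem.Dict String (List (String × List (String × String)))) =
      (fixtures.map (fun f => (pvDate f, (pvTime f, f)))).foldl
        (fun d p => d.modify p.1 [] (· ++ [p.2])) PySem.Dict.empty := by
    rw [List.foldl_map]
  have hgetD : ∀ dd, (fixtures.foldl (fun bd f => bd.modify (pvDate f) [] (· ++ [(pvTime f, f)]))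
      (PySem.Dict.empty : PySem.Dict String (List (String × List (String × String))))).getD dd [] =
      (fixtures.filter (fun f => pvDate f == dd)).map (fun f => (pvTime f, f)) := by
    intro dd
    rw [hbd, PySem.Dict.getD_foldl_modify_append, PySem.Dict.getD_empty]
    simp only [List.nil_append, List.filter_map, List.map_map]
    rfl
  have hkeys : (fixtures.foldl (fun bd f => bd.modify (pvDate f) [] (· ++ [(pvTime f, f)]))
      (PySem.Dict.empty : PySem.Dict String (List (String × List (String × String))))).keys =
      PySem.Set.ofList (fixtures.map pvDate) := by
    rw [PySem.Dict.keys_foldl_modify_key, PySem.Dict.keys_empty]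
    rfl
  have hpair : (PySem.List.sorted (PySem.Set.ofList (fixtures.map pvDate)) (fun x => x) false).Pairwise (· < ·) :=
    PySem.List.sorted_ofList_pairwise_lt (fixtures.map pvDate)
  simp only [calendar_text_py, calendar_text_py_alt]
  rw [hrows, hkeys,
    pvMain (fun r => r.1) (fun r => r.2.1) (fixtures.map (fun f => (pvDate f, pvTime f, f)))]
  have hmapfst : (fixtures.map (fun f => (pvDate f, pvTime f, f))).map (fun r => r.1) =
      fixtures.map pvDate := by
    simp [List.map_map, Function.comp]
  rw [hmapfst]
  rw [pvOnePass (PySem.List.sorted (PySem.Set.ofList (fixtures.map pvDate)) (fun x => x) false)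
    (fun dd => PySem.List.sorted
      ((fixtures.map (fun f => (pvDate f, pvTime f, f))).filter (fun r => r.1 == dd)) (fun r => r.2.1) false)
    (hpair.imp (fun h => ne_of_lt h))
    (by
      intro dd hdd
      have hdd' : dd ∈ fixtures.map pvDate :=
        (PySem.Set.mem_ofList _ _).mp ((PySem.List.mem_sorted _ _ _ _).mp hdd)
      constructor
      · intro r hr
        have := (PySem.List.mem_sorted _ _ _ _).mp hr
        exact eq_of_beq (List.mem_filter.mp this).2
      · rw [Ne, PySem.List.sorted_eq_nil_iff]
        obtain ⟨f, hf, hk⟩ := List.mem_map.mp hdd'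
        intro hnil
        have : (pvDate f, pvTime f, f) ∈
            (fixtures.map (fun f => (pvDate f, pvTime f, f))).filter (fun r => r.1 == dd) :=
          List.mem_filter.mpr ⟨List.mem_map.mpr ⟨f, hf, rfl⟩, by simp [hk]⟩
        simp [hnil] at this)
    [pvHeader days] none (by simp)]
  rw [pvAFold (PySem.List.sorted (PySem.Set.ofList (fixtures.map pvDate)) (fun x => x) false)
    (fun d => PySem.List.sorted ((fixtures.foldl (fun bd f => bd.modify (pvDate f) [] (· ++ [(pvTime f, f)]))
      (PySem.Dict.empty : PySem.Dict String (List (String × List (String × String))))).getD d [])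
      (fun x => x.1) false) [pvHeader days]]
  congr 1
  congr 1
  apply List.flatMap_congr
  intro dd _
  rw [hgetD dd]
  rw [List.filter_map, pvSorted_map, pvSorted_map]
  simp only [List.map_map]
  rfl

theorem calendar_text_py_spec : Claim_equal_calendar_text_py := by
  intro fixtures days _ _
  exact calendar_text_py_eq fixtures days
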